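-- pv_equiv track=rewrite | github.com/akhileshwar1/algo-data-structs | hacker_rank/count_subarrays.py | count_opt
-- ===== SOURCE A (Python) =====
-- def count_opt(lst, index):
--     if(index == len(lst) - 1):
--         total = []
--         total.append(0)
--         return total
--     else:
--         if(lst[index] <= lst[index + 1]):
--             total = count_opt(lst, index + 1)
--             total.append(1 + total[len(total) - 1])
--             return total
--         else:
--             total = count_opt(lst, index + 1)
--             total.append(0)
--             return total
-- ===== SOURCE B (Python) =====
-- def count_opt(lst, index):
--     total = [0]
--     for i in range(len(lst) - 2, index - 1, -1):
--         total.append(1 + total[-1] if lst[i] <= lst[i + 1] else 0)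
--     return total
-- ===== Notes on version B (the rewrite author's own statement) =====
-- stated objective: simpler
-- what changed: Replaces A's recursion (recurse to the end of the list, append on the way back) with a single iterative loop over range(len(lst)-2, index-1, -1) that appends each run length to an accumulator list; no recursion and no repeated len(total)-1 indexing.
import Mathlib
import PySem

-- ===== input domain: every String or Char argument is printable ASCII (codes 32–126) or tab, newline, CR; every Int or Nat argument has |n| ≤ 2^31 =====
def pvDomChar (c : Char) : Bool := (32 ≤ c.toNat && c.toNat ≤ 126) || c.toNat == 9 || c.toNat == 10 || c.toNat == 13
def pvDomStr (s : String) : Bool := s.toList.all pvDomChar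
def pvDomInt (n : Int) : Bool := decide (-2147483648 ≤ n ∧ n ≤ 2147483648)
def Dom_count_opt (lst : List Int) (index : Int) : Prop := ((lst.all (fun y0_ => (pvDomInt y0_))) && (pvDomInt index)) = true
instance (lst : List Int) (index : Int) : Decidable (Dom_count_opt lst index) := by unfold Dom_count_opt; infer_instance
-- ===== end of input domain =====

-- B replaces A's recursion by one iterative loop over a countdown range (simpler decomposition, same values).

-- ===== PORT A =====
-- Literal port of A's recursion; pyGet? = none is Python's IndexError (excluded by Pre_), port returns [].
def count_opt (lst : List Int) (index : Int) : List Int :=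
  if index = (lst.length : Int) - 1 then
    [0]
  else
    match h1 : PySem.List.pyGet? lst index, PySem.List.pyGet? lst (index + 1) with
    | some a, some b =>
      if a ≤ b then
        let total := count_opt lst (index + 1)
        total ++ [1 + PySem.List.pyGetD total ((total.length : Int) - 1) 0]
      else
        let total := count_opt lst (index + 1)
        total ++ [0]
    | _, _ => []
  termination_by ((lst.length : Int) - index).toNat
  decreasing_by
    all_goals
      have hin : PySem.Raise.InRange lst.length index := by
        by_contra hc
        rw [← PySem.List.pyGet?_eq_none_iff] at hc
        simp [hc] at h1
      obtain ⟨_, hlt⟩ := hin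
      omega

-- ===== PORT B =====
-- Literal port of Source B: total = [0]; for i in range(len(lst)-2, index-1, -1): append.
def count_opt_alt (lst : List Int) (index : Int) : List Int :=
  (PySem.List.pyRange ((lst.length : Int) - 2) (index - 1) (-1)).foldl
    (fun total i =>
      total ++ [if PySem.List.pyGetD lst i 0 ≤ PySem.List.pyGetD lst (i + 1) 0
                then 1 + PySem.List.pyGetD total (-1) 0 else 0])
    [0]

-- ===== PRECONDITION & SPEC =====
-- Pre_ is exactly where A returns normally: the base case index = len-1 (also hit by the empty
-- list with index = -1), or an in-range start strictly before it; elsewhere A raises IndexError.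
def Pre_count_opt (lst : List Int) (index : Int) : Prop :=
  index = (lst.length : Int) - 1 ∨ (-(lst.length : Int) ≤ index ∧ index < (lst.length : Int) - 1)
instance (lst : List Int) (index : Int) : Decidable (Pre_count_opt lst index) := by unfold Pre_count_opt; infer_instance

def pvWitness_count_opt : List Int × Int := ([3, 1, 2, 2, 0], 0)

def Spec_count_opt (lst : List Int) (index : Int) (out : List Int) : Prop := out = count_opt_alt lst index
instance (lst : List Int) (index : Int) (out : List Int) : Decidable (Spec_count_opt lst index out) := by unfold Spec_count_opt; infer_instance

-- ===== CLAIM (what is proved, stated in full; the proofs are below) =====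
def Claim_equal_count_opt : Prop := ∀ (lst : List Int) (index : Int), Dom_count_opt lst index → Pre_count_opt lst index → Spec_count_opt lst index (count_opt lst index)

-- ===== LEMMAS AND PROOFS =====

-- B's accumulator never becomes empty: every step appends one element.
theorem count_opt_alt_step_ne_nil (lst : List Int) (l : List Int) (init : List Int)
    (h : init ≠ []) :
    l.foldl (fun total i =>
      total ++ [if PySem.List.pyGetD lst i 0 ≤ PySem.List.pyGetD lst (i + 1) 0
                then 1 + PySem.List.pyGetD total (-1) 0 else 0]) init ≠ [] := by
  induction l generalizing init with
  | nil => exact h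
  | cons x xs ih => exact ih _ (by simp)

theorem count_opt_alt_ne_nil (lst : List Int) (index : Int) : count_opt_alt lst index ≠ [] := by
  unfold count_opt_alt
  exact count_opt_alt_step_ne_nil lst _ [0] (by simp)

-- Peeling the last visited position off B's loop: one more step at the front of the countdown.
theorem count_opt_alt_unfold (lst : List Int) (index : Int)
    (h : index < (lst.length : Int) - 1) :
    count_opt_alt lst index =
      count_opt_alt lst (index + 1) ++
        [if PySem.List.pyGetD lst index 0 ≤ PySem.List.pyGetD lst (index + 1) 0
         then 1 + PySem.List.pyGetD (count_opt_alt lst (index + 1)) (-1) 0 else 0] := by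
  unfold count_opt_alt
  have hsplit : PySem.List.pyRange ((lst.length : Int) - 2) (index - 1) (-1) =
      PySem.List.pyRange ((lst.length : Int) - 2) index (-1) ++ [index] := by
    rw [PySem.List.pyRange_neg_one_eq_reverse, PySem.List.pyRange_neg_one_eq_reverse]
    rw [show index - 1 + 1 = index by ring]
    rw [PySem.List.pyRange_one_cons (by omega)]
    simp
  rw [hsplit, List.foldl_append]
  simp

-- last element of a nonempty list: total[len(total)-1] = total[-1]
theorem pyGetD_len_sub_one (total : List Int) (h : total ≠ []) :
    PySem.List.pyGetD total ((total.length : Int) - 1) 0 = PySem.List.pyGetD total (-1) 0 := by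
  have hl : 0 < total.length := List.length_pos_iff.mpr h
  rw [PySem.List.pyGetD_eq_getElem total 0 (by omega) (by omega),
      PySem.List.pyGetD_neg_one total 0 h]
  rw [List.getLast_eq_getElem]
  congr 1
  omega

theorem count_opt_eq_alt (lst : List Int) (index : Int)
    (hpre : Pre_count_opt lst index) : count_opt lst index = count_opt_alt lst index := by
  by_cases hbase : index = (lst.length : Int) - 1
  · rw [count_opt, if_pos hbase]
    unfold count_opt_alt
    rw [PySem.List.pyRange_neg_one_eq_nil (by omega)]
    rfl
  · obtain ⟨hlo, hhi⟩ : -(lst.length : Int) ≤ index ∧ index < (lst.length : Int) - 1 := by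
      rcases hpre with h | h
      · exact absurd h hbase
      · exact h
    have hA : PySem.List.pyGet? lst index =
        some (PySem.List.pyGetD lst index 0) := by
      have hne : PySem.List.pyGet? lst index ≠ none := by
        rw [Ne, PySem.List.pyGet?_eq_none_iff]
        intro hc
        exact hc ⟨hlo, by omega⟩
      rcases Option.ne_none_iff_exists'.mp hne with ⟨v, hv⟩
      rw [hv]
      simp [PySem.List.pyGetD, hv]
    have hB : PySem.List.pyGet? lst (index + 1) =
        some (PySem.List.pyGetD lst (index + 1) 0) := by
      have hne : PySem.List.pyGet? lst (index + 1) ≠ none := by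
        rw [Ne, PySem.List.pyGet?_eq_none_iff]
        intro hc
        exact hc ⟨by omega, by omega⟩
      rcases Option.ne_none_iff_exists'.mp hne with ⟨v, hv⟩
      rw [hv]
      simp [PySem.List.pyGetD, hv]
    have ih : count_opt lst (index + 1) = count_opt_alt lst (index + 1) := by
      apply count_opt_eq_alt
      by_cases h' : index + 1 = (lst.length : Int) - 1
      · exact Or.inl h'
      · exact Or.inr ⟨by omega, by omega⟩
    rw [count_opt, if_neg hbase, hA, hB]
    simp only
    rw [count_opt_alt_unfold lst index hhi]
    rw [ih]
    split_ifs with hc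
    · rw [pyGetD_len_sub_one _ (count_opt_alt_ne_nil lst (index + 1))]
    · rfl
  termination_by ((lst.length : Int) - index).toNat
  decreasing_by omega

-- ===== VERDICT (by name: the statement is the Claim_ definition above) =====
theorem count_opt_spec : Claim_equal_count_opt := by
  intro lst index _ hpre
  unfold Spec_count_opt
  exact count_opt_eq_alt lst index hpre
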